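-- pv_equiv track=rewrite | github.com/kisun-bit/py-dr | cpkt/core/xlogging.py | format_relevant_values
-- ===== SOURCE A (Python) =====
-- PIPE_CHAR = '|'
--
-- CAP_CHAR = '->'
--
-- def format_relevant_values(relevant_values, source):
--     lines = [source]
--     for i in reversed(range(len(relevant_values))):
--         _, col, val = relevant_values[i]
--         pipe_cols = [pcol for _, pcol, _ in relevant_values[:i]]
--         line = ''
--         index = 0
--         for pc in pipe_cols:
--             line += (' ' * (pc - index)) + PIPE_CHAR
--             index = pc + 1
--
--         line += '{}{} {}'.format((' ' * (col - index)), CAP_CHAR, val)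
--         lines.append(line)
--
--     return lines
-- ===== SOURCE B (Python) =====
-- PIPE_CHAR = '|'
--
-- CAP_CHAR = '->'
--
-- def format_relevant_values(relevant_values, source):
--     # one forward pass: maintain the running pipe-prefix and index instead of
--     # rebuilding them from scratch for every row
--     rows = []
--     prefix = ''
--     index = 0
--     for _, col, val in relevant_values:
--         rows.append(prefix + ' ' * (col - index) + CAP_CHAR + ' ' + val)
--         prefix += ' ' * (col - index) + PIPE_CHAR
--         index = col + 1
--     lines = [source]
--     lines.extend(reversed(rows))
--     return lines
-- ===== Notes on version B (the rewrite author's own statement) =====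
-- stated objective: alternative
-- what changed: Single forward pass that carries the running pipe-prefix string and index, storing each row's line as it goes and reversing at the end, instead of rebuilding pipe_cols and re-running the inner pipe loop from scratch for every row.
import Mathlib
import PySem

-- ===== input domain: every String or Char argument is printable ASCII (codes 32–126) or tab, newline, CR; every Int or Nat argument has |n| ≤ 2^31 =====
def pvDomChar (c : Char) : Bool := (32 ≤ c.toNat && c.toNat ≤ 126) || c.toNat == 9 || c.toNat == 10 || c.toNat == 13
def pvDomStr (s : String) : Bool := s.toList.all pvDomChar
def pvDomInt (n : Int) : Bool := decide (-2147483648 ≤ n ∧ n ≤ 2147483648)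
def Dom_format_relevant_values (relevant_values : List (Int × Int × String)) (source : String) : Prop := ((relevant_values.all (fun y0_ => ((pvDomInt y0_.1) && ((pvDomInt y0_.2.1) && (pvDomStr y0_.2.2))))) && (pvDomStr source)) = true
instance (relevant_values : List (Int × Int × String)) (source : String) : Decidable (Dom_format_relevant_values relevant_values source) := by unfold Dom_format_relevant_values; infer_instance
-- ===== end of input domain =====

-- ===== PORT A =====
-- B re-derives each row's pipe prefix incrementally in one forward pass instead of A's
-- per-row rebuild of pipe_cols and re-run of the inner pipe loop (objective: alternative).

-- Python's ' ' * k (empty for k ≤ 0)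
def pvSpaces (k : Int) : String := String.ofList (List.replicate k.toNat ' ')

-- A's inner loop over pipe_cols: state (line, index)
def pvPipeFold (cols : List Int) : String × Int :=
  cols.foldl (fun p pc => (p.1 ++ pvSpaces (pc - p.2) ++ "|", pc + 1)) ("", 0)

-- A's loop body for index i (rv[i] is always in range, so getD is exact)
def pvRowA (rv : List (Int × Int × String)) (i : Nat) : String :=
  let t := rv.getD i (0, 0, "")
  let p := pvPipeFold ((rv.take i).map (fun x => x.2.1))
  p.1 ++ pvSpaces (t.2.1 - p.2) ++ "->" ++ " " ++ t.2.2

def format_relevant_values (relevant_values : List (Int × Int × String)) (source : String) : List String :=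
  source :: (List.range relevant_values.length).reverse.map (pvRowA relevant_values)

-- ===== PORT B =====
-- B's single forward pass: state (prefix, index, rows)
def pvStepB (p : String × Int × List String) (t : Int × Int × String) : String × Int × List String :=
  (p.1 ++ pvSpaces (t.2.1 - p.2.1) ++ "|", t.2.1 + 1,
   p.2.2 ++ [p.1 ++ pvSpaces (t.2.1 - p.2.1) ++ "->" ++ " " ++ t.2.2])

def format_relevant_values_alt (relevant_values : List (Int × Int × String)) (source : String) : List String :=
  source :: (relevant_values.foldl pvStepB ("", 0, [])).2.2.reverse

-- ===== PRECONDITION & SPEC =====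
def Spec_format_relevant_values (relevant_values : List (Int × Int × String)) (source : String) (out : List String) : Prop := out = format_relevant_values_alt relevant_values source
instance (relevant_values : List (Int × Int × String)) (source : String) (out : List String) : Decidable (Spec_format_relevant_values relevant_values source out) := by unfold Spec_format_relevant_values; infer_instance

-- ===== CLAIM (what is proved, stated in full; the proofs are below) =====
def Claim_equal_format_relevant_values : Prop := ∀ (relevant_values : List (Int × Int × String)) (source : String), Dom_format_relevant_values relevant_values source → Spec_format_relevant_values relevant_values source (format_relevant_values relevant_values source)

-- ===== LEMMAS AND PROOFS =====

-- the forward fold's state after the whole list: prefix/index = A's pipe fold over all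
-- columns, rows = A's per-index rows in forward order
theorem pvFold_inv (rv : List (Int × Int × String)) :
    rv.foldl pvStepB ("", 0, []) =
      ((pvPipeFold (rv.map (fun x => x.2.1))).1,
       (pvPipeFold (rv.map (fun x => x.2.1))).2,
       (List.range rv.length).map (pvRowA rv)) := by
  induction rv using List.reverseRecOn with
  | nil => rfl
  | append_singleton xs x ih =>
    have hrow : ∀ i, i < xs.length → pvRowA (xs ++ [x]) i = pvRowA xs i := by
      intro i hi
      simp [pvRowA, List.getD, List.getElem?_append_left hi,
        List.take_append_of_le_length (le_of_lt hi)]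
    have hlast : pvRowA (xs ++ [x]) xs.length =
        (pvPipeFold (xs.map (fun x => x.2.1))).1 ++
          pvSpaces (x.2.1 - (pvPipeFold (xs.map (fun x => x.2.1))).2) ++ "->" ++ " " ++ x.2.2 := by
      simp [pvRowA, List.getD]
    simp only [List.foldl_append, List.foldl_cons, List.foldl_nil, ih, pvStepB,
      List.length_append, List.length_cons, List.length_nil,
      List.range_succ, List.map_append, List.map_cons, List.map_nil, pvPipeFold,
      List.foldl_append]
    rw [List.map_congr_left (fun i hi => hrow i (List.mem_range.mp hi)), hlast]
    simp [pvPipeFold]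

-- ===== VERDICT (by name: the statement is the Claim_ definition above) =====
theorem format_relevant_values_spec : Claim_equal_format_relevant_values := by
  intro rv source _
  unfold Spec_format_relevant_values format_relevant_values format_relevant_values_alt
  rw [pvFold_inv]
  simp [List.map_reverse]
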